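-- pv_equiv track=rewrite | github.com/lukashermann/pytorch-a2c-ppo-acktr | a2c_ppo_acktr/augmentation/datasets.py | idx_to_episode_index
-- ===== SOURCE A (Python) =====
-- def idx_to_episode_index(idx, index_data=None):
--     """
--     Converts an index in [0...len(dataset)] to an episode and step index (where step index
--     is the index of the step in the specific episode)
--     :param idx:
--     :return: episode_idx, step_idx
--
--     >>> index = {0: {"data": [1,2,3,4], "data_length": 4}, 1: {"data": [5,6,7,8], "data_length": 4}}
--     >>> idx_to_episode_index(0, index)
--     (0, 0)
--     >>> idx_to_episode_index(2, index)
--     (0, 2)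
--     >>> idx_to_episode_index(7, index)
--     (1, 3)
--     >>> idx_to_episode_index(8, index)
--     Traceback (most recent call last):
--     ...
--     ValueError: Invalid index 8
--     """
--     assert index_data is not None
--
--     total_steps = 0
--     for episode, data in index_data.items():
--         episode_length = data["data_length"]
--         if total_steps + episode_length > idx:
--             result_episode = episode
--             result_step = idx - total_steps
--             return result_episode, result_step
--         total_steps += episode_length
--     raise ValueError("Invalid index {}".format(idx))
-- ===== SOURCE B (Python) =====
-- def idx_to_episode_index(idx, index_data=None):
--     assert index_data is not None
--     keys = list(index_data)
--     lengths = [data.get("data_length", 0) for data in index_data.values()]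
--     cums = []
--     total = 0
--     for n in lengths:
--         total += n
--         cums.append(total)
--     j = next((i for i, c in enumerate(cums) if c > idx), None)
--     if j is None:
--         raise ValueError("Invalid index {}".format(idx))
--     return keys[j], idx - (cums[j] - lengths[j])
-- ===== Notes on version B (the rewrite author's own statement) =====
-- stated objective: alternative
-- what changed: B separates data from search: it builds the key list, the length list and the cumulative prefix sums once, then finds the first prefix sum exceeding idx over the plain int list and answers by subtraction, instead of A's single accumulate-compare-and-return loop over the dict items.
import Mathlib
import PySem

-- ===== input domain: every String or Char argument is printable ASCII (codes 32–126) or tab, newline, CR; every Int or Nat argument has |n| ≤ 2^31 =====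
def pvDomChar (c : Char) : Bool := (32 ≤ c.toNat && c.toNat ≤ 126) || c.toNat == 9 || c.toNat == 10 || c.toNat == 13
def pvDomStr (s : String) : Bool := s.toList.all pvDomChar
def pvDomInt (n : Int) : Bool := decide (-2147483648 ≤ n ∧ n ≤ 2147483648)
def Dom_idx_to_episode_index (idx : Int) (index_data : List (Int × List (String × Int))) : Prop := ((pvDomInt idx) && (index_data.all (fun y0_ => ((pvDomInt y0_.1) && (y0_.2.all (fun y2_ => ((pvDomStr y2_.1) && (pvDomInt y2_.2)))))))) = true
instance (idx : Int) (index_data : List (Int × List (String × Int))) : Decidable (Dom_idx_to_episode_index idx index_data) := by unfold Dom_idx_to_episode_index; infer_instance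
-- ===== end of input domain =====

-- B builds the key/length/prefix-sum lists once and then searches the first prefix sum
-- exceeding idx over the plain int list, instead of A's accumulate-compare-and-return loop;
-- equivalence of the return values is proved on Pre_.


-- shared tiny helper: the Python dict lookup data["data_length"] (first match in the assoc list)
def epLen (d : List (String × Int)) : Option Int :=
  (d.find? (fun q => q.1 == "data_length")).map (·.2)

-- ===== PORT A =====
-- A's loop: accumulate total_steps over the items until total_steps + episode_length > idx.
-- [] exhausted → ValueError, missing "data_length" → KeyError: both excluded by Pre_, default (0,0).
def aGo (idx : Int) (total : Int) : List (Int × List (String × Int)) → Int × Int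
  | [] => (0, 0)
  | (episode, data) :: rest =>
    match epLen data with
    | none => (0, 0)
    | some episode_length =>
      if total + episode_length > idx then (episode, idx - total)
      else aGo idx (total + episode_length) rest

def idx_to_episode_index (idx : Int) (index_data : List (Int × List (String × Int))) : Int × Int :=
  aGo idx 0 index_data

-- ===== PORT B =====
-- B's prefix-sum loop: total += n; cums.append(total).
def bCums (total : Int) : List Int → List Int
  | [] => []
  | n :: rest => (total + n) :: bCums (total + n) rest

-- B's generator search: next((i for i, c in enumerate(cums) if c > idx), None).
def bNext (idx : Int) (i : Nat) : List Int → Option Nat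
  | [] => none
  | c :: rest => if c > idx then some i else bNext idx (i + 1) rest

def idx_to_episode_index_alt (idx : Int) (index_data : List (Int × List (String × Int))) : Int × Int :=
  let keys := index_data.map Prod.fst
  -- lengths = [data.get("data_length", 0) for data in index_data.values()]
  let lengths := index_data.map (fun p => (epLen p.2).getD 0)
  let cums := bCums 0 lengths
  match bNext idx 0 cums with
  | none => (0, 0)  -- raise ValueError, excluded by Pre_
  | some j => (keys.getD j 0, idx - (cums.getD j 0 - lengths.getD j 0))

-- ===== PRECONDITION & SPEC =====
-- Pre_ is exactly the condition under which A returns instead of raising: some prefix of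
-- episodes, each carrying "data_length", already covers idx (otherwise A raises KeyError at
-- the first episode without the key it reaches, or ValueError after exhausting the dict).
def Pre_idx_to_episode_index (idx : Int) (index_data : List (Int × List (String × Int))) : Prop :=
  ∃ j ∈ List.range index_data.length,
      (∀ p ∈ index_data.take (j + 1), (epLen p.2).isSome) ∧
      idx < ((index_data.take (j + 1)).map (fun p => (epLen p.2).getD 0)).sum
instance (idx : Int) (index_data : List (Int × List (String × Int))) : Decidable (Pre_idx_to_episode_index idx index_data) := by
  unfold Pre_idx_to_episode_index; infer_instance

def pvWitness_idx_to_episode_index : Int × (List (Int × List (String × Int))) :=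
  (2, [(0, [("data_length", 4)]), (1, [("data_length", 4)])])

def Spec_idx_to_episode_index (idx : Int) (index_data : List (Int × List (String × Int))) (out : Int × Int) : Prop := out = idx_to_episode_index_alt idx index_data
instance (idx : Int) (index_data : List (Int × List (String × Int))) (out : Int × Int) : Decidable (Spec_idx_to_episode_index idx index_data out) := by unfold Spec_idx_to_episode_index; infer_instance

-- ===== CLAIM (what is proved, stated in full; the proofs are below) =====
def Claim_equal_idx_to_episode_index : Prop := ∀ (idx : Int) (index_data : List (Int × List (String × Int))), Dom_idx_to_episode_index idx index_data → Pre_idx_to_episode_index idx index_data → Spec_idx_to_episode_index idx index_data (idx_to_episode_index idx index_data)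

-- ===== LEMMAS AND PROOFS =====

def lenD (p : Int × List (String × Int)) : Int := (epLen p.2).getD 0

-- B's body with an arbitrary starting total, as the induction target
def bCore (idx total : Int) (l : List (Int × List (String × Int))) : Int × Int :=
  match bNext idx 0 (bCums total (l.map lenD)) with
  | none => (0, 0)
  | some j => ((l.map Prod.fst).getD j 0,
      idx - ((bCums total (l.map lenD)).getD j 0 - (l.map lenD).getD j 0))

theorem bNext_shift (idx : Int) (i : Nat) (cs : List Int) :
    bNext idx i cs = (bNext idx 0 cs).map (· + i) := by
  induction cs generalizing i with
  | nil => simp [bNext]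
  | cons c rest ih =>
    by_cases h : c > idx
    · simp [bNext, h]
    · simp only [bNext, if_neg h]
      rw [ih (i + 1), ih 1]
      cases bNext idx 0 rest
      · simp
      · simp
        omega

theorem aGo_eq_bCore (idx : Int) (l : List (Int × List (String × Int))) :
    ∀ total : Int,
      (∃ j ∈ List.range l.length,
          (∀ p ∈ l.take (j + 1), (epLen p.2).isSome) ∧
          idx < total + ((l.take (j + 1)).map lenD).sum) →
      aGo idx total l = bCore idx total l := by
  induction l with
  | nil =>
    intro total hex
    obtain ⟨j, hj, _⟩ := hex
    simp at hj
  | cons p rest ih =>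
    intro total hex
    obtain ⟨e, d⟩ := p
    obtain ⟨j0, hj0, hsome0, hlt0⟩ := hex
    have hd : (epLen d).isSome := hsome0 (e, d) (by simp)
    obtain ⟨L, hL⟩ := Option.isSome_iff_exists.mp hd
    have hlenD : lenD (e, d) = L := by simp [lenD, hL]
    by_cases hcase : total + L > idx
    · -- first episode already covers idx
      have hA : aGo idx total ((e, d) :: rest) = (e, idx - total) := by
        simp [aGo, hL, hcase]
      have hB : bCore idx total ((e, d) :: rest) = (e, idx - total) := by
        simp only [bCore, List.map_cons, hlenD, bCums, bNext, if_pos hcase]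
        simp
      rw [hA, hB]
    · -- skip the first episode on both sides
      have hA : aGo idx total ((e, d) :: rest) = aGo idx (total + L) rest := by
        simp [aGo, hL, hcase]
      have hex' : ∃ j ∈ List.range rest.length,
          (∀ p ∈ rest.take (j + 1), (epLen p.2).isSome) ∧
          idx < (total + L) + ((rest.take (j + 1)).map lenD).sum := by
        have hj' := List.mem_range.mp hj0
        cases j0 with
        | zero =>
          exfalso
          simp [hlenD] at hlt0
          omega
        | succ j' =>
          refine ⟨j', List.mem_range.mpr (by simp at hj'; omega), ?_, ?_⟩
          · intro q hq
            exact hsome0 q (by simp [hq])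
          · simp only [List.take_succ_cons, List.map_cons, List.sum_cons, hlenD] at hlt0
            omega
      have hIH := ih (total + L) hex'
      rw [hA, hIH]
      -- unfold one step of B on the cons and match it with bCore on rest
      simp only [bCore, List.map_cons, hlenD, bCums, bNext, if_neg hcase]
      rw [bNext_shift idx 1]
      cases bNext idx 0 (bCums (total + L) (rest.map lenD)) with
      | none => simp
      | some j => simp
    
theorem idx_to_episode_index_spec : Claim_equal_idx_to_episode_index := by
  intro idx l _hdom hpre
  obtain ⟨j, hj, hsome, hlt⟩ := hpre
  unfold Spec_idx_to_episode_index
  have h := aGo_eq_bCore idx l 0 ⟨j, hj, hsome, by simpa using hlt⟩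
  unfold idx_to_episode_index idx_to_episode_index_alt
  rw [h]
  unfold bCore
  rw [show lenD = (fun p : Int × List (String × Int) => (epLen p.2).getD 0) from rfl]
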